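-- pv_equiv track=rewrite | github.com/fenixguard/yandex_algorithms | sprint_8/G.search_with_offset.py | solution
-- ===== SOURCE A (Python) =====
-- from typing import List
--
-- def find(search: List[int], pattern: List[int], start: int) -> int:
--     result = -1
--
--     if start >= len(search):
--         return result
--
--     if len(search) - start < len(pattern):
--         return result
--
--     for pos in range(start, len(search) - len(pattern) + 1):
--         shift = None
--         match = True
--
--         for offset in range(len(pattern)):
--             if shift is None:
--                 shift = pattern[offset] - search[pos]
--
--             if search[pos + offset] + shift != pattern[offset]:
--                 match = False
--                 break
--
--         if match:
--             result = pos + 1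
--             break
--
--     return result
--
-- def solution(search: List[int], pattern: List[int]):
--     occurrences = []
--
--     len_pattern = len(pattern)
--     len_search = len(search)
--
--     if len_pattern > len_search:
--         return occurrences
--
--     start = 0
--
--     while True:
--         pos = find(search, pattern, start)
--
--         if pos == -1:
--             break
--
--         occurrences.append(pos)
--         start = pos
--
--     return occurrences
-- ===== SOURCE B (Python) =====
-- from typing import List
--
--
-- def _deltas(xs):
--     return [b - a for a, b in zip(xs, xs[1:])]
--
--
-- def _step(dp, f, j, c):
--     # KMP automaton step: extend the current matched prefix length j by c.
--     while j > 0 and c != dp[j]: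
--         j = f[j - 1]
--     if c == dp[j]:
--         j += 1
--     return j
--
--
-- def solution(search: List[int], pattern: List[int]):
--     # KMP on the consecutive-difference arrays: a window matches the pattern
--     # up to an additive shift iff its delta array equals the pattern's deltas.
--     if not search:
--         return []
--     ds = _deltas(search)
--     dp = _deltas(pattern)
--     k = len(dp)
--     if k == 0:
--         return list(range(1, len(ds) + 2))
--     f = [0] * k  # failure table: f[i] = longest proper border of dp[:i+1]
--     j = 0
--     for i in range(1, k):
--         j = _step(dp, f, j, dp[i])
--         f[i] = j
--     out = []
--     q = 0
--     for i, c in enumerate(ds):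
--         q = _step(dp, f, q, c)
--         if q == k:
--             out.append(i - k + 2)
--             q = f[k - 1]
--     return out
-- ===== Notes on version B (the rewrite author's own statement) =====
-- stated objective: alternative
-- what changed: Replaces A's restart loop of per-window rescans (each window re-deriving an additive shift and comparing element by element) with the KMP algorithm run on the consecutive-difference arrays of search and pattern: a failure table is built once and the text deltas are scanned in a single pass with no window restarts (worst-case O(n+m) vs A's O(n*m), but not measurably faster on the generated inputs, where A's inner loop bails out early).
import Mathlib
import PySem

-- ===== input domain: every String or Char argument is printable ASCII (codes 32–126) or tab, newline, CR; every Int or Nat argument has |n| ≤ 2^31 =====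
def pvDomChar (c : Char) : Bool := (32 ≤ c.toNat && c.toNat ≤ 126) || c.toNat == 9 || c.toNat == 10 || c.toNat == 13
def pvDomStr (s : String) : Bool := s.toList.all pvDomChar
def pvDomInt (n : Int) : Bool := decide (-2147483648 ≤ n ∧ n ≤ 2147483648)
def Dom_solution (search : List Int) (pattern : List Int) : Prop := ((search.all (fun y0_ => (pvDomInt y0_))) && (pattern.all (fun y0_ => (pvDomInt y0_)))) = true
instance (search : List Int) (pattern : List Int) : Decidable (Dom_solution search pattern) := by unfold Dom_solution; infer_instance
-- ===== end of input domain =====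

-- B replaces A's restart loop of per-window shift-normalising rescans with the
-- KMP algorithm run on the consecutive-difference arrays (objective: alternative
-- algorithm; not measured faster on the generated inputs).

-- ===== PORT A =====
-- inner 'for offset in range(len(pattern))' of find; indices are in range at every
-- reachable call, so pyGetD _ _ 0 is exact there
def pvInnerA (search pattern : List Int) (pos : Int) : List Int → Option Int → Bool
  | [], _ => true
  | o :: rest, shift =>
      let shift := match shift with
        | none => some (PySem.List.pyGetD pattern o 0 - PySem.List.pyGetD search pos 0)
        | some s => some s
      if PySem.List.pyGetD search (pos + o) 0 + shift.getD 0 ≠ PySem.List.pyGetD pattern o 0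
      then false
      else pvInnerA search pattern pos rest shift

-- 'for pos in range(start, len(search) - len(pattern) + 1)' with break
def pvFindLoopA (search pattern : List Int) : List Int → Int
  | [] => -1
  | p :: rest =>
      if pvInnerA search pattern p (PySem.List.pyRange 0 (pattern.length : Int) 1) none
      then p + 1
      else pvFindLoopA search pattern rest

def pvFindA (search pattern : List Int) (start : Int) : Int :=
  if start ≥ (search.length : Int) then -1
  else if (search.length : Int) - start < (pattern.length : Int) then -1
  else pvFindLoopA search pattern
        (PySem.List.pyRange start ((search.length : Int) - (pattern.length : Int) + 1) 1)

-- 'while True'; the fuel only makes the recursion total (start strictly increases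
-- and stays ≤ len(search), so len(search)+1 steps always suffice)
def pvSolLoopA (search pattern : List Int) : Nat → Int → List Int → List Int
  | 0, _, occ => occ
  | fuel+1, start, occ =>
      let pos := pvFindA search pattern start
      if pos = -1 then occ
      else pvSolLoopA search pattern fuel pos (occ ++ [pos])

def solution (search : List Int) (pattern : List Int) : List Int :=
  if (pattern.length : Int) > (search.length : Int) then []
  else pvSolLoopA search pattern (search.length + 1) 0 []

-- ===== PORT B =====
-- [b - a for a, b in zip(xs, xs[1:])]
def pvDiffs (l : List Int) : List Int :=
  (l.zip (PySem.List.slice l (some 1) none)).map (fun ab => ab.2 - ab.1)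

-- '_step' inner while loop 'while j > 0 and c != dp[j]: j = f[j-1]'; the fuel only
-- makes the loop total (each stored failure value is below its index, so fuel = j,
-- the value pvStep passes, always suffices)
def pvFall (dp : List Int) (f : List Nat) (c : Int) : Nat → Nat → Nat
  | 0, j => j
  | fuel+1, j => if 0 < j ∧ c ≠ dp.getD j 0 then pvFall dp f c fuel (f.getD (j-1) 0) else j

-- '_step(dp, f, j, c)'
def pvStep (dp : List Int) (f : List Nat) (j : Nat) (c : Int) : Nat :=
  let r := pvFall dp f c j j
  if c = dp.getD r 0 then r + 1 else r

-- 'f = [0]*k; j = 0; for i in range(1, k): j = _step(dp, f, j, dp[i]); f[i] = j'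
def pvBuildStep (dp : List Int) (st : List Nat × Nat) (i : Nat) : List Nat × Nat :=
  let j := pvStep dp st.1 st.2 (dp.getD i 0)
  (st.1.set i j, j)

def pvFailTable (dp : List Int) : List Nat :=
  ((List.range' 1 (dp.length - 1)).foldl (pvBuildStep dp) (List.replicate dp.length 0, 0)).1

-- 'for i, c in enumerate(ds): q = _step(...); if q == k: append(i-k+2); q = f[k-1]'
def pvKmpLoop (dp : List Int) (f : List Nat) (k : Nat) :
    List Int → Nat → Nat → List Int → List Int
  | [], _, _, out => out
  | c :: rest, i, q, out =>
      let q' := pvStep dp f q c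
      if q' = k then
        pvKmpLoop dp f k rest (i+1) (f.getD (k-1) 0) (out ++ [(i : Int) - (k : Int) + 2])
      else pvKmpLoop dp f k rest (i+1) q' out

def solution_alt (search : List Int) (pattern : List Int) : List Int :=
  if search = [] then []
  else
    let ds := pvDiffs search
    let dp := pvDiffs pattern
    let k := dp.length
    if k = 0 then (List.range' 1 (ds.length + 1)).map (fun (m : Nat) => (m : Int))
    else pvKmpLoop dp (pvFailTable dp) k ds 0 0 []

-- ===== PRECONDITION & SPEC =====
def Spec_solution (search : List Int) (pattern : List Int) (out : List Int) : Prop := out = solution_alt search pattern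
instance (search : List Int) (pattern : List Int) (out : List Int) : Decidable (Spec_solution search pattern out) := by unfold Spec_solution; infer_instance

-- ===== CLAIM (what is proved, stated in full; the proofs are below) =====
def Claim_equal_solution : Prop := ∀ (search : List Int) (pattern : List Int), Dom_solution search pattern → Spec_solution search pattern (solution search pattern)

-- ===== LEMMAS AND PROOFS =====

-- the common yardstick of the proof: "the delta window at p equals the pattern deltas"
def pvP (search pattern : List Int) (p : Int) : Bool :=
  PySem.List.slice (pvDiffs search) (some p) (some (p + ((pvDiffs pattern).length : Int)))
    == pvDiffs pattern

theorem pvDiffs_length (l : List Int) : (pvDiffs l).length = l.length - 1 := by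
  simp [pvDiffs, PySem.List.slice_from_one, List.length_zip, List.length_tail]

theorem pvDiffs_getD (l : List Int) (i : Nat) (h : i + 1 < l.length) :
    (pvDiffs l).getD i 0 = l.getD (i+1) 0 - l.getD i 0 := by
  unfold pvDiffs
  rw [PySem.List.slice_from_one]
  have h1 : i < (l.zip l.tail).length := by
    simp [List.length_zip, List.length_tail]; omega
  rw [List.getD_eq_getElem _ _ (by simpa using h1), List.getD_eq_getElem _ _ (by omega),
      List.getD_eq_getElem _ _ (by omega)]
  simp [List.getElem_zip, List.getElem_tail]

-- ---------- A-side: A's result is "map (+1) of the matching window positions" ----------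

-- inner loop once the shift is fixed: a Boolean 'all' over the remaining offsets
theorem pvInnerA_some (search pattern : List Int) (pos sh : Int) (L : List Int) :
    pvInnerA search pattern pos L (some sh) =
      L.all (fun o => PySem.List.pyGetD search (pos + o) 0 + sh
                        == PySem.List.pyGetD pattern o 0) := by
  induction L with
  | nil => rfl
  | cons o rest ih =>
      simp only [pvInnerA, List.all_cons, ih, Option.getD_some]
      by_cases h : PySem.List.pyGetD search (pos + o) 0 + sh = PySem.List.pyGetD pattern o 0
      · simp [h]
      · simp [h]

-- window equality of difference arrays, pointwise
theorem pvTakeDropEq (xs ys : List Int) (j : Nat) (hj : j + ys.length ≤ xs.length) :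
    ((xs.drop j).take ys.length = ys) ↔ ∀ i < ys.length, xs.getD (j+i) 0 = ys.getD i 0 := by
  constructor
  · intro h i hi
    rw [List.getD_eq_getElem _ _ (by omega), List.getD_eq_getElem _ _ hi]
    calc xs[j+i] = ((xs.drop j).take ys.length)[i]'(by simp; omega) := by
          rw [List.getElem_take, List.getElem_drop]
      _ = ys[i] := by simp only [h]
  · intro h
    apply List.ext_getElem
    · simp; omega
    · intro i h1 h2
      rw [List.getElem_take, List.getElem_drop]
      have := h i h2
      rw [List.getD_eq_getElem _ _ (by omega), List.getD_eq_getElem _ _ h2] at this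
      exact this

-- telescoping: per-offset agreement under the first-element shift ⇔ equal consecutive differences
theorem pvBridge (search pattern : List Int) (j : Nat)
    (hm : 1 ≤ pattern.length) (hjm : j + pattern.length ≤ search.length) :
    ((∀ u : Nat, 1 ≤ u → u < pattern.length →
        search.getD (j+u) 0 + (pattern.getD 0 0 - search.getD j 0) = pattern.getD u 0)
     ↔ (∀ i < (pvDiffs pattern).length, (pvDiffs search).getD (j+i) 0 = (pvDiffs pattern).getD i 0)) := by
  have hk : (pvDiffs pattern).length = pattern.length - 1 := pvDiffs_length pattern
  constructor
  · intro h i hi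
    rw [hk] at hi
    rw [pvDiffs_getD search (j+i) (by omega), pvDiffs_getD pattern i (by omega)]
    by_cases hi0 : i = 0
    · subst hi0
      have h1 := h 1 (by omega) (by omega)
      simp only [Nat.add_zero, Nat.zero_add]
      linarith
    · have h1 := h i (by omega) (by omega)
      have h2 := h (i+1) (by omega) (by omega)
      have : j + (i+1) = j + i + 1 := by omega
      rw [this] at h2
      linarith
  · intro h u
    induction u with
    | zero => omega
    | succ u ihu =>
        intro _ hu
        have hd := h u (by omega)
        rw [pvDiffs_getD search (j+u) (by omega), pvDiffs_getD pattern u (by omega)] at hd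
        have hju : j + (u+1) = j + u + 1 := by omega
        rw [hju]
        by_cases hu0 : u = 0
        · subst hu0; simp only [Nat.add_zero] at hd ⊢; linarith
        · have := ihu (by omega) (by omega)
          linarith

-- the inner loop decides exactly B's difference-slice predicate
theorem pvInnerA_eq_pvP (search pattern : List Int) (p : Int)
    (hp0 : 0 ≤ p) (hpn : p < (search.length : Int) - ((pvDiffs pattern).length : Int))
    (hmn : pattern.length ≤ search.length) :
    pvInnerA search pattern p (PySem.List.pyRange 0 (pattern.length : Int) 1) none
      = pvP search pattern p := by
  have hk : (pvDiffs pattern).length = pattern.length - 1 := pvDiffs_length pattern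
  have hs : (pvDiffs search).length = search.length - 1 := pvDiffs_length search
  lift p to ℕ using hp0 with j
  by_cases hm : pattern.length = 0
  · have hpat : pattern = [] := List.length_eq_zero_iff.mp hm
    subst hpat
    have hd0 : pvDiffs ([] : List Int) = [] := rfl
    have hsl : PySem.List.slice (pvDiffs search) (some (j : Int)) (some (j : Int)) = [] := by
      rw [PySem.List.slice_natCast]; simp
    simp [pvP, hd0, hsl, pvInnerA, PySem.List.pyRange_one_eq_nil]
  · have hm1 : 1 ≤ pattern.length := by omega
    have hjk : j + (pvDiffs pattern).length ≤ (pvDiffs search).length := by omega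
    rw [PySem.List.pyRange_one_cons (by exact_mod_cast Nat.pos_of_ne_zero hm)]
    show pvInnerA search pattern (j : Int)
        (0 :: PySem.List.pyRange (0+1) (pattern.length : Int) 1) none = _
    rw [show ((0:Int)+1) = 1 by ring]
    simp only [pvInnerA, add_zero]
    rw [if_neg (by ring_nf; simp)]
    rw [pvInnerA_some]
    rw [Bool.eq_iff_iff]
    unfold pvP
    rw [PySem.List.slice_natCast_add]
    simp only [List.all_eq_true, beq_iff_eq, PySem.List.mem_pyRange_one, and_imp]
    rw [pvTakeDropEq _ _ _ hjk]
    have hcast : ∀ (u : Nat), u < pattern.length →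
        (PySem.List.pyGetD search ((j : Int) + (u : Int)) 0 +
          (PySem.List.pyGetD pattern 0 0 - PySem.List.pyGetD search (j : Int) 0)
            = PySem.List.pyGetD pattern (u : Int) 0
        ↔ search.getD (j+u) 0 + (pattern.getD 0 0 - search.getD j 0) = pattern.getD u 0) := by
      intro u _
      rw [← Nat.cast_add]
      rw [show ((0:Int)) = ((0:Nat) : Int) by simp]
      simp only [PySem.List.pyGetD_natCast]
    constructor
    · intro h
      refine (pvBridge search pattern j hm1 (by omega)).mp ?_
      intro u hu1 hum
      have := h (u : Int) (by exact_mod_cast hu1) (by exact_mod_cast hum)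
      exact (hcast u hum).mp this
    · intro h o ho1 hom
      have h2 := (pvBridge search pattern j hm1 (by omega)).mpr h
      lift o to ℕ using (by omega) with u
      exact (hcast u (by exact_mod_cast hom)).mpr
        (h2 u (by exact_mod_cast ho1) (by exact_mod_cast hom))

-- pvFindLoopA over a list all of whose elements satisfy the bridge is 'first filtered + 1'
theorem pvFindLoopA_eq (search pattern : List Int) (L : List Int)
    (h : ∀ p ∈ L,
      pvInnerA search pattern p (PySem.List.pyRange 0 (pattern.length : Int) 1) none
        = pvP search pattern p) :
    pvFindLoopA search pattern L =
      match L.filter (pvP search pattern) with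
      | [] => -1
      | q :: _ => q + 1 := by
  induction L with
  | nil => rfl
  | cons p rest ih =>
      have hp := h p (List.mem_cons_self ..)
      simp only [pvFindLoopA, List.filter_cons, hp]
      by_cases hP : pvP search pattern p = true
      · simp [hP]
      · simp only [Bool.not_eq_true] at hP
        simp [hP, ih (fun q hq => h q (List.mem_cons_of_mem _ hq))]

-- splitting the filtered range at its first element
theorem pvFilterRange_split (P : Int → Bool) (a b q : Int) (rest : List Int)
    (h : (PySem.List.pyRange a b 1).filter P = q :: rest) :
    a ≤ q ∧ q < b ∧ rest = (PySem.List.pyRange (q+1) b 1).filter P := by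
  by_cases hab : b ≤ a
  · rw [PySem.List.pyRange_one_eq_nil hab] at h; simp at h
  · have hab' : a < b := by omega
    rw [PySem.List.pyRange_one_cons hab', List.filter_cons] at h
    by_cases hPa : P a = true
    · rw [if_pos hPa] at h
      injection h with h1 h2
      subst h1
      exact ⟨le_refl _, hab', h2.symm⟩
    · rw [if_neg hPa] at h
      obtain ⟨h1, h2, h3⟩ := pvFilterRange_split P (a+1) b q rest h
      exact ⟨by omega, h2, h3⟩
termination_by (b - a).toNat
decreasing_by omega

theorem pvFindA_eq (search pattern : List Int) (start : Int)
    (hmn : pattern.length ≤ search.length)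
    (h0 : 0 ≤ start) (hsn : start ≤ (search.length : Int)) :
    pvFindA search pattern start =
      match (PySem.List.pyRange start ((search.length : Int) - ((pvDiffs pattern).length : Int)) 1).filter (pvP search pattern) with
      | [] => -1
      | q :: _ => q + 1 := by
  have hk : (pvDiffs pattern).length = pattern.length - 1 := pvDiffs_length pattern
  unfold pvFindA
  by_cases hg1 : start ≥ (search.length : Int)
  · rw [if_pos hg1, PySem.List.pyRange_one_eq_nil (by omega)]
    rfl
  · rw [if_neg hg1]
    by_cases hg2 : (search.length : Int) - start < (pattern.length : Int)
    · have hm1 : 1 ≤ pattern.length := by omega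
      rw [if_pos hg2, PySem.List.pyRange_one_eq_nil (by omega)]
      rfl
    · rw [if_neg hg2]
      by_cases hm0 : pattern.length = 0
      · -- empty pattern: the first scanned position always matches
        have hpat : pattern = [] := List.length_eq_zero_iff.mp hm0
        subst hpat
        have hlt : start < (search.length : Int) := by omega
        rw [show ((([] : List Int).length : Int)) = 0 by simp]
        rw [PySem.List.pyRange_one_cons (by omega : start < (search.length : Int) - 0 + 1)]
        rw [PySem.List.pyRange_one_cons (by
            simpa using hlt : start < (search.length : Int) - ((pvDiffs ([] : List Int)).length : Int))]
        have htrue : pvP search [] start = true := by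
          lift start to ℕ using h0 with j
          have : pvP search [] (j : Int) =
              (PySem.List.slice (pvDiffs search) (some (j:Int))
                (some ((j:Int) + ((pvDiffs ([] : List Int)).length : Int))) == pvDiffs ([] : List Int)) := rfl
          rw [this]
          simp only [show pvDiffs ([] : List Int) = [] from rfl, List.length_nil,
            Nat.cast_zero, add_zero]
          rw [PySem.List.slice_natCast]
          simp
        rw [List.filter_cons, if_pos htrue]
        simp [pvFindLoopA, pvInnerA, PySem.List.pyRange_one_eq_nil]
      · have hm1 : 1 ≤ pattern.length := by omega
        have hrange : (search.length : Int) - (pattern.length : Int) + 1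
            = (search.length : Int) - ((pvDiffs pattern).length : Int) := by omega
        rw [hrange]
        rw [pvFindLoopA_eq search pattern _ (by
          intro p hp
          rw [PySem.List.mem_pyRange_one] at hp
          exact pvInnerA_eq_pvP search pattern p (by omega) (by omega) hmn)]

theorem pvSolLoopA_eq (search pattern : List Int) (fuel : Nat) (start : Int) (occ : List Int)
    (hmn : pattern.length ≤ search.length)
    (h0 : 0 ≤ start) (hsn : start ≤ (search.length : Int))
    (hfuel : ((search.length : Int) - start).toNat < fuel) :
    pvSolLoopA search pattern fuel start occ =
      occ ++ ((PySem.List.pyRange start ((search.length : Int) - ((pvDiffs pattern).length : Int)) 1).filter (pvP search pattern)).map (fun p => p + 1) := by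
  induction fuel generalizing start occ with
  | zero => omega
  | succ fuel ih =>
      simp only [pvSolLoopA]
      rw [pvFindA_eq search pattern start hmn h0 hsn]
      cases hF : (PySem.List.pyRange start ((search.length : Int) - ((pvDiffs pattern).length : Int)) 1).filter (pvP search pattern) with
      | nil => simp
      | cons q rest =>
          obtain ⟨hq1, hq2, hrest⟩ := pvFilterRange_split (pvP search pattern) start _ q rest hF
          rw [show (match (q :: rest : List Int) with | [] => (-1 : Int) | p :: _ => p + 1) = q + 1
                from rfl]
          rw [if_neg (by omega)]
          rw [ih (q+1) (occ ++ [q+1]) (by omega) (by omega) (by omega)]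
          rw [← hrest]
          simp

-- A's result in closed form
theorem pvAchar (search pattern : List Int) :
    solution search pattern =
      ((PySem.List.pyRange 0 ((search.length : Int) - ((pvDiffs pattern).length : Int)) 1).filter
        (pvP search pattern)).map (fun p => p + 1) := by
  have hk : (pvDiffs pattern).length = pattern.length - 1 := pvDiffs_length pattern
  unfold solution
  by_cases hm : pattern.length ≤ search.length
  · rw [if_neg (by exact_mod_cast not_lt.mpr (by exact_mod_cast hm))]
    rw [pvSolLoopA_eq search pattern (search.length + 1) 0 [] hm (by omega)
          (by exact_mod_cast Nat.zero_le _) (by omega)]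
    rfl
  · rw [if_pos (by exact_mod_cast not_le.mp hm)]
    rw [PySem.List.pyRange_one_eq_nil (by omega)]
    rfl

-- ---------- B-side: KMP on the delta arrays computes the same list ----------

-- the longest j ≤ cap with "w.take j is a suffix of t"
def pvMQ (w t : List Int) (cap : Nat) : Nat :=
  Nat.findGreatest (fun j => w.take j <:+ t) cap

-- longest proper border length of w.take m
def pvLB (w : List Int) (m : Nat) : Nat := pvMQ w (w.take m) (m - 1)

-- "f is a correct failure table below n"
def pvGood (w : List Int) (f : List Nat) (n : Nat) : Prop :=
  ∀ i, i < n → f.getD i 0 = pvLB w (i + 1)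

theorem pvMQ_le (w t : List Int) (cap : Nat) : pvMQ w t cap ≤ cap :=
  Nat.findGreatest_le cap

theorem pvMQ_suffix (w t : List Int) (cap : Nat) : w.take (pvMQ w t cap) <:+ t := by
  unfold pvMQ
  exact Nat.findGreatest_spec (P := fun j => w.take j <:+ t) (Nat.zero_le cap) (by simp)

theorem pvMQ_ge (w t : List Int) (cap j : Nat) (hj : j ≤ cap) (hs : w.take j <:+ t) :
    j ≤ pvMQ w t cap := by
  unfold pvMQ
  by_contra h
  exact Nat.findGreatest_is_greatest (Nat.not_le.mp h) hj hs

theorem pvMQ_nil (w : List Int) (cap : Nat) (hw : w ≠ []) : pvMQ w [] cap = 0 := by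
  unfold pvMQ
  rw [Nat.findGreatest_eq_zero_iff]
  intro m hm _ hs
  rw [List.suffix_nil] at hs
  have := congrArg List.length hs
  simp [List.length_take] at this
  rcases this with h | h
  · omega
  · exact hw h

-- every shorter simultaneous suffix is a border of the longer one
theorem pvBorder_le (w t : List Int) (q j : Nat) (hq : q < w.length) (hjq : j < q)
    (hqs : w.take q <:+ t) (hjs : w.take j <:+ t) : j ≤ pvLB w q := by
  have h1 : w.take j <:+ w.take q :=
    List.suffix_of_suffix_length_le hjs hqs (by simp [List.length_take]; omega)
  exact pvMQ_ge w (w.take q) (q-1) j (by omega) h1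

theorem pvTakeSucc (w : List Int) (i : Nat) (h : i < w.length) :
    w.take (i+1) = w.take i ++ [w.getD i 0] := by
  rw [List.getD_eq_getElem _ _ h, List.take_add_one]
  simp [List.getElem?_eq_getElem h]

theorem pvSuffixSnoc (u t : List Int) (x c : Int) :
    u ++ [x] <:+ t ++ [c] ↔ u <:+ t ∧ x = c := by
  constructor
  · rintro ⟨s, hs⟩
    rw [← List.append_assoc] at hs
    obtain ⟨h1, h2⟩ := List.append_inj' hs (by simp)
    refine ⟨⟨s, h1⟩, by injection h2⟩
  · rintro ⟨⟨s, rfl⟩, rfl⟩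
    exact ⟨s, by simp⟩

-- extending a matched prefix by one character
theorem pvExtIff (w t : List Int) (c : Int) (j : Nat) (h1 : 1 ≤ j) (h2 : j ≤ w.length) :
    (w.take j <:+ t ++ [c]) ↔ (w.take (j-1) <:+ t ∧ w.getD (j-1) 0 = c) := by
  obtain ⟨j', rfl⟩ : ∃ j', j = j' + 1 := ⟨j - 1, by omega⟩
  rw [pvTakeSucc w j' (by omega), pvSuffixSnoc]
  simp

-- the failure-link fall computes the longest matchable border
theorem pvFall_spec (w : List Int) (f : List Nat) (c : Int) (t : List Int) :
    ∀ (fuel q : Nat), q ≤ fuel → q < w.length → pvGood w f q → w.take q <:+ t →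
      (pvFall w f c fuel q ≤ q ∧ w.take (pvFall w f c fuel q) <:+ t ∧
       (c ≠ w.getD (pvFall w f c fuel q) 0 → pvFall w f c fuel q = 0) ∧
       ∀ j, j ≤ q → w.take j <:+ t → c = w.getD j 0 → j ≤ pvFall w f c fuel q) := by
  intro fuel
  induction fuel with
  | zero =>
      intro q hqf hqw hgood hsuf
      have hq0 : q = 0 := by omega
      subst hq0
      exact ⟨le_rfl, List.nil_suffix, fun _ => rfl, fun j hj _ _ => by omega⟩
  | succ fuel ih =>
      intro q hqf hqw hgood hsuf
      by_cases hcond : 0 < q ∧ c ≠ w.getD q 0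
      · rw [show pvFall w f c (fuel+1) q
              = pvFall w f c fuel (f.getD (q-1) 0) from by rw [pvFall, if_pos hcond]]
        have hf : f.getD (q-1) 0 = pvLB w q := by
          have := hgood (q-1) (by omega)
          rwa [show q - 1 + 1 = q by omega] at this
        rw [hf]
        have hlb : pvLB w q ≤ q - 1 := pvMQ_le _ _ _
        have hsub : w.take (pvLB w q) <:+ t :=
          (pvMQ_suffix w (w.take q) (q-1)).trans hsuf
        obtain ⟨r1, r2, r3, r4⟩ := ih (pvLB w q) (by omega) (by omega)
          (fun i hi => hgood i (by omega)) hsub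
        refine ⟨by omega, r2, r3, ?_⟩
        intro j hj hjs hjc
        by_cases hjlb : j ≤ pvLB w q
        · exact r4 j hjlb hjs hjc
        · exfalso
          by_cases hjq : j = q
          · exact hcond.2 (hjq ▸ hjc)
          · have := pvBorder_le w t q j hqw (by omega) hsuf hjs
            omega
      · rw [show pvFall w f c (fuel+1) q = q from by rw [pvFall, if_neg hcond]]
        refine ⟨le_rfl, hsuf, ?_, fun j hj _ _ => hj⟩
        intro hc
        by_cases h0 : 0 < q
        · exact absurd ⟨h0, hc⟩ hcond
        · omega

-- one KMP automaton step computes the longest pattern prefix that is a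
-- suffix of t ++ [c], given that q does so for t (below the cap m)
theorem pvStep_spec (w : List Int) (f : List Nat) (t : List Int) (c : Int) (q m : Nat)
    (hm : m < w.length) (hq : q ≤ m) (hgood : pvGood w f q)
    (hsuf : w.take q <:+ t) (hmax : ∀ j, j ≤ m → w.take j <:+ t → j ≤ q) :
    pvStep w f q c ≤ m + 1 ∧ w.take (pvStep w f q c) <:+ t ++ [c] ∧
      ∀ j, j ≤ m + 1 → w.take j <:+ t ++ [c] → j ≤ pvStep w f q c := by
  obtain ⟨r1, r2, r3, r4⟩ := pvFall_spec w f c t q q le_rfl (by omega) hgood hsuf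
  set r := pvFall w f c q q with hr
  have hstep : pvStep w f q c = if c = w.getD r 0 then r + 1 else r := rfl
  by_cases hc : c = w.getD r 0
  · rw [hstep, if_pos hc]
    refine ⟨by omega, ?_, ?_⟩
    · rw [pvTakeSucc w r (by omega), pvSuffixSnoc]
      exact ⟨r2, hc.symm⟩
    · intro j hj hjs
      rcases Nat.eq_zero_or_pos j with hj0 | hj0
      · omega
      · rw [pvExtIff w t c j hj0 (by omega)] at hjs
        have hj1 : j - 1 ≤ q := hmax (j-1) (by omega) hjs.1
        have := r4 (j-1) hj1 hjs.1 hjs.2.symm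
        omega
  · have hr0 : r = 0 := r3 hc
    rw [hstep, if_neg hc, hr0]
    refine ⟨by omega, by simp, ?_⟩
    intro j hj hjs
    rcases Nat.eq_zero_or_pos j with hj0 | hj0
    · omega
    · exfalso
      rw [pvExtIff w t c j hj0 (by omega)] at hjs
      have hj1 : j - 1 ≤ q := hmax (j-1) (by omega) hjs.1
      have h0 : j - 1 ≤ r := r4 (j-1) hj1 hjs.1 hjs.2.symm
      rw [hr0] at h0
      have hj1' : j = 1 := by omega
      subst hj1'
      exact hc (by rw [hr0]; exact hjs.2.symm)

-- the builder loop fills the failure table with longest-proper-border lengths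
theorem pvBuild_inv (w : List Int) :
    ∀ (n i : Nat) (f : List Nat) (j : Nat),
      1 ≤ i → i + n = w.length → f.length = w.length →
      pvGood w f i → j = pvLB w i →
      (((List.range' i n).foldl (pvBuildStep w) (f, j)).1.length = w.length ∧
       pvGood w (((List.range' i n).foldl (pvBuildStep w) (f, j)).1) w.length) := by
  intro n
  induction n with
  | zero =>
      intro i f j h1 h2 h3 h4 _
      refine ⟨h3, ?_⟩
      have : i = w.length := by omega
      simpa [List.range'] using (this ▸ h4)
  | succ n ih =>
      intro i f j h1 h2 h3 h4 h5
      rw [List.range'_succ, List.foldl_cons]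
      have hiw : i < w.length := by omega
      have hjle : j ≤ i - 1 := h5 ▸ pvMQ_le _ _ _
      have hstep := pvStep_spec w f (w.take i) (w.getD i 0) j (i-1) (by omega) hjle
        (fun i0 hi0 => h4 i0 (by omega)) (h5 ▸ pvMQ_suffix w (w.take i) (i-1))
        (fun j0 hj0 hjs => h5 ▸ pvMQ_ge w (w.take i) (i-1) j0 hj0 hjs)
      rw [← pvTakeSucc w i hiw] at hstep
      obtain ⟨s1, s2, s3⟩ := hstep
      rw [show i - 1 + 1 = i by omega] at s1 s3
      set q' := pvStep w f j (w.getD i 0) with hq'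
      have hq'lb : q' = pvLB w (i+1) := by
        have hle1 : q' ≤ pvMQ w (w.take (i+1)) i := pvMQ_ge w (w.take (i+1)) i q' s1 s2
        have hle2 : pvMQ w (w.take (i+1)) i ≤ q' :=
          s3 _ (pvMQ_le _ _ _) (pvMQ_suffix w (w.take (i+1)) i)
        unfold pvLB
        rw [show i + 1 - 1 = i by omega]
        omega
      have hnew : pvGood w (f.set i q') (i+1) := by
        intro t0 ht0
        by_cases hti : t0 = i
        · subst hti
          rw [show (f.set t0 q').getD t0 0 = q' from by
            simp [List.getD_eq_getElem?_getD, show t0 < f.length by omega]]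
          exact hq'lb
        · rw [show (f.set i q').getD t0 0 = f.getD t0 0 from by
            simp [List.getD_eq_getElem?_getD, List.getElem?_set_ne (by omega : i ≠ t0)]]
          exact h4 t0 (by omega)
      have := ih (i+1) (f.set i q') q' (by omega) (by omega) (by simp [h3]) hnew hq'lb
      simpa [pvBuildStep] using this

theorem pvFail_good (w : List Int) (hk : 1 ≤ w.length) :
    (pvFailTable w).length = w.length ∧ pvGood w (pvFailTable w) w.length := by
  have hgood1 : pvGood w (List.replicate w.length 0) 1 := by
    intro i hi
    have : i = 0 := by omega
    subst this
    rw [List.getD_replicate _ (by omega)]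
    unfold pvLB pvMQ
    simp
  have hlb1 : (0 : Nat) = pvLB w 1 := by
    unfold pvLB pvMQ
    simp
  have h := pvBuild_inv w (w.length - 1) 1 (List.replicate w.length 0) 0
    le_rfl (by omega) (by simp) hgood1 hlb1
  exact h

-- the matcher loop emits exactly the positions where the pattern deltas
-- are a suffix of the processed text prefix
theorem pvKmpLoop_eq (w ds : List Int) (f : List Nat) (hk : 1 ≤ w.length)
    (hgood : pvGood w f w.length) :
    ∀ (u : List Int) (i q : Nat) (out : List Int),
      ds = ds.take i ++ u →
      q = pvMQ w (ds.take i) (w.length - 1) →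
      pvKmpLoop w f w.length u i q out =
        out ++ ((List.range' i u.length).filter (fun idx => decide (w <:+ ds.take (idx+1)))).map
          (fun (idx : Nat) => (idx : Int) - (w.length : Int) + 2) := by
  intro u
  induction u with
  | nil => intro i q out _ _; simp [pvKmpLoop]
  | cons c rest ih =>
      intro i q out hds hq
      have hlen := congrArg List.length hds
      simp [List.length_take] at hlen
      have hi : i < ds.length := by omega
      have hmini : min i ds.length = i := by omega
      have hdrop : ds.drop i = c :: rest := by
        have h1 : (ds.take i).length = i := by simp [List.length_take, hmini]
        have h2 := List.drop_left (l₁ := ds.take i) (l₂ := c :: rest)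
        rw [h1] at h2
        conv_lhs => rw [hds]
        exact h2
      have htake1 : ds.take (i+1) = ds.take i ++ [c] := by
        rw [List.take_add, hdrop]
        rfl
      have hds' : ds = ds.take (i+1) ++ rest := by
        rw [htake1, List.append_assoc]
        exact hds
      have hqle : q ≤ w.length - 1 := hq ▸ pvMQ_le _ _ _
      have hstep := pvStep_spec w f (ds.take i) c q (w.length - 1) (by omega) hqle
        (fun i0 hi0 => hgood i0 (by omega)) (hq ▸ pvMQ_suffix w (ds.take i) (w.length - 1))
        (fun j0 hj0 hjs => hq ▸ pvMQ_ge w (ds.take i) (w.length - 1) j0 hj0 hjs)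
      rw [← htake1] at hstep
      obtain ⟨s1, s2, s3⟩ := hstep
      rw [show w.length - 1 + 1 = w.length by omega] at s1 s3
      set q' := pvStep w f q c with hq'
      have hmatch : q' = w.length ↔ w <:+ ds.take (i+1) := by
        constructor
        · intro h
          rw [← List.take_length (l := w), ← h]
          exact s2
        · intro h
          have := s3 w.length le_rfl (by rw [List.take_length]; exact h)
          omega
      simp only [pvKmpLoop]
      by_cases hq'k : q' = w.length
      · rw [if_pos hq'k]
        have hw : w <:+ ds.take (i+1) := hmatch.mp hq'k
        have hfk : f.getD (w.length - 1) 0 = pvLB w w.length := by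
          have := hgood (w.length - 1) (by omega)
          rwa [show w.length - 1 + 1 = w.length by omega] at this
        have hnewq : f.getD (w.length - 1) 0 = pvMQ w (ds.take (i+1)) (w.length - 1) := by
          rw [hfk]
          have hle1 : pvLB w w.length ≤ pvMQ w (ds.take (i+1)) (w.length - 1) := by
            apply pvMQ_ge w (ds.take (i+1)) (w.length - 1) _ (pvMQ_le _ _ _)
            exact ((pvMQ_suffix w (w.take w.length) (w.length - 1)).trans
              (by rw [List.take_length]; exact hw))
          have hle2 : pvMQ w (ds.take (i+1)) (w.length - 1) ≤ pvLB w w.length := by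
            set b := pvMQ w (ds.take (i+1)) (w.length - 1) with hb
            have hbs : w.take b <:+ ds.take (i+1) := pvMQ_suffix _ _ _
            have hbl : b ≤ w.length - 1 := pvMQ_le _ _ _
            have hbw : w.take b <:+ w := by
              have := List.suffix_of_suffix_length_le hbs hw
                (by simp [List.length_take]; try omega)
              exact this
            unfold pvLB
            apply pvMQ_ge w (w.take w.length) (w.length - 1) b hbl
            rwa [List.take_length]
          omega
        rw [ih (i+1) (f.getD (w.length - 1) 0) (out ++ [(i : Int) - (w.length : Int) + 2])
          hds' hnewq]
        simp only [List.length_cons]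
        rw [List.range'_succ, List.filter_cons]
        rw [if_pos (by simpa using hw)]
        simp
      · rw [if_neg hq'k]
        have hnm : ¬ w <:+ ds.take (i+1) := fun h => hq'k (hmatch.mpr h)
        have hnewq : q' = pvMQ w (ds.take (i+1)) (w.length - 1) := by
          have hle1 : q' ≤ pvMQ w (ds.take (i+1)) (w.length - 1) :=
            pvMQ_ge w (ds.take (i+1)) (w.length - 1) q' (by omega) s2
          have hle2 : pvMQ w (ds.take (i+1)) (w.length - 1) ≤ q' :=
            s3 _ (by have := pvMQ_le w (ds.take (i+1)) (w.length - 1); omega)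
              (pvMQ_suffix _ _ _)
          omega
        rw [ih (i+1) q' out hds' hnewq]
        simp only [List.length_cons]
        rw [List.range'_succ, List.filter_cons]
        rw [if_neg (by simpa using hnm)]

-- reindexing: "match ends at delta index i" ↔ "window starts at p = i - (k-1)"
theorem pvReindex (w ds : List Int) (hk : 1 ≤ w.length) :
    ((List.range' 0 ds.length).filter (fun i => decide (w <:+ ds.take (i+1)))).map
        (fun (i : Nat) => (i : Int) - (w.length : Int) + 2)
      = ((PySem.List.pyRange 0 ((ds.length : Int) + 1 - (w.length : Int)) 1).filter
          (fun p => PySem.List.slice ds (some p) (some (p + (w.length : Int))) == w)).map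
          (fun p => p + 1) := by
  set k := w.length with hkdef
  set L := ds.length with hLdef
  by_cases hkL : k ≤ L
  · have hcast : ((L : Int) + 1 - (k : Int)) = ((L + 1 - k : Nat) : Int) := by omega
    set M := L + 1 - k with hM
    rw [hcast, PySem.List.pyRange_one, show ((L + 1 - k : Nat) : Int) - 0 = ((M : Nat) : Int) from by omega]
    rw [Int.toNat_natCast]
    rw [List.filter_map, List.map_map]
    -- split the left range: positions below k-1 can never end a match
    rw [show L = (k - 1) + M from by omega, ← List.range'_append (s := 0) (m := k - 1) (n := M) (step := 1)]
    rw [List.filter_append]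
    have hnil : (List.range' 0 (k-1)).filter (fun i => decide (w <:+ ds.take (i+1))) = [] := by
      rw [List.filter_eq_nil_iff]
      intro a ha
      rw [List.mem_range'_1] at ha
      simp only [decide_eq_true_eq]
      intro hsuf
      have h1 := hsuf.length_le
      simp [List.length_take] at h1
      omega
    rw [hnil, List.nil_append, show 0 + 1 * (k - 1) = k - 1 from by omega]
    rw [List.range'_eq_map_range, List.filter_map, List.map_map]
    apply congrArg₂
    · funext j
      simp only [Function.comp_apply]
      omega
    · apply List.filter_congr
      intro j hj
      rw [List.mem_range] at hj
      have hjk : j + k ≤ L := by omega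
      simp only [Function.comp_apply]
      rw [show ((0 : Int) + (j : Int)) = ((j : Nat) : Int) from by omega]
      rw [PySem.List.slice_natCast_add]
      rw [show k - 1 + j + 1 = j + k from by omega]
      rw [Bool.eq_iff_iff]
      simp only [decide_eq_true_eq, beq_iff_eq]
      constructor
      · intro hsuf
        have h2 : (ds.drop j).take k <:+ ds.take (j+k) := by
          rw [List.take_add]
          exact List.suffix_append _ _
        refine List.IsSuffix.eq_of_length
          (List.suffix_of_suffix_length_le h2 hsuf ?_) ?_
        · simp [List.length_take, List.length_drop]; omega
        · simp [List.length_take, List.length_drop]; omega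
      · intro heq
        rw [List.take_add, heq]
        exact List.suffix_append _ _
  · have h1 : (List.range' 0 L).filter (fun i => decide (w <:+ ds.take (i+1))) = [] := by
      rw [List.filter_eq_nil_iff]
      intro a ha
      rw [List.mem_range'_1] at ha
      simp only [decide_eq_true_eq]
      intro hsuf
      have := hsuf.length_le
      simp [List.length_take] at this
      omega
    rw [h1, PySem.List.pyRange_one_eq_nil (by omega)]
    simp

-- B's result in the same closed form
theorem pvBchar (search pattern : List Int) (hs : search ≠ []) :
    solution_alt search pattern =
      ((PySem.List.pyRange 0 ((search.length : Int) - ((pvDiffs pattern).length : Int)) 1).filter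
        (pvP search pattern)).map (fun p => p + 1) := by
  have hn : 1 ≤ search.length := by
    cases search with
    | nil => exact absurd rfl hs
    | cons a t => simp
  have hL : (pvDiffs search).length = search.length - 1 := pvDiffs_length search
  unfold solution_alt
  rw [if_neg hs]
  set w := pvDiffs pattern with hw
  set ds := pvDiffs search with hds
  set k := w.length with hk
  by_cases hk0 : k = 0
  · rw [if_pos hk0]
    have hwnil : w = [] := List.length_eq_zero_iff.mp hk0
    have hncast : (search.length : Int) - (k : Int) = ((search.length : Nat) : Int) := by
      omega
    rw [hncast, PySem.List.pyRange_one, show ((search.length : Nat) : Int) - 0 = ((search.length : Nat) : Int) from by omega, Int.toNat_natCast]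
    have hfilter : ∀ p ∈ (List.range search.length).map (fun j => (0 : Int) + (j : Nat)),
        pvP search pattern p = true := by
      intro p hp
      rw [List.mem_map] at hp
      obtain ⟨j, _, rfl⟩ := hp
      unfold pvP
      rw [← hw, ← hds, hwnil]
      simp only [List.length_nil, Nat.cast_zero]
      rw [show ((0 : Int) + (j : Nat)) = ((j : Nat) : Int) from by omega]
      rw [show ((j : Nat) : Int) + 0 = ((j : Nat) : Int) + ((0 : Nat) : Int) from by omega]
      rw [PySem.List.slice_natCast_add]
      simp
    rw [List.filter_eq_self.mpr hfilter, List.map_map]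
    rw [List.range'_eq_map_range, List.map_map]
    rw [show ds.length + 1 = search.length from by omega]
    apply List.map_congr_left
    intro j _
    simp only [Function.comp_apply]
    omega
  · rw [if_neg hk0]
    have hk1 : 1 ≤ k := by omega
    obtain ⟨hflen, hfgood⟩ := pvFail_good w hk1
    rw [pvKmpLoop_eq w ds (pvFailTable w) hk1 hfgood ds 0 0 []
      (by simp) (by rw [List.take_zero]; exact (pvMQ_nil w (k-1)
        (by intro h; exact hk0 (by rw [hk, h]; rfl))).symm)]
    rw [List.nil_append, pvReindex w ds hk1]
    have hbound : (ds.length : Int) + 1 - (w.length : Int)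
        = (search.length : Int) - ((pvDiffs pattern).length : Int) := by
      rw [← hw, ← hk]
      omega
    rw [hbound]
    rfl

-- ===== VERDICT (by name: the statement is the Claim_ definition above) =====
theorem solution_spec : Claim_equal_solution := by
  intro search pattern _
  unfold Spec_solution
  by_cases hs : search = []
  · subst hs
    cases pattern with
    | nil => rfl
    | cons a t => simp [solution, solution_alt]
  · rw [pvAchar, pvBchar search pattern hs]
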